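-- pv_equiv track=rewrite | github.com/Steve2608/AoC-2022 | 16/16.py | gains
-- ===== SOURCE A (Python) =====
-- from collections import deque
--
-- LEAVES_ONLY: bool = True
--
-- def iter_paths(adjacent, start, time):
--
--     # DFS because we don't need partial-paths
--     def paths(curr, duration):
--         is_leaf = True
--         for neigh, dur in adjacent[curr].items():
--             if duration + dur + 1 <= time and neigh not in visited:
--                 visited.add(neigh)
--                 path.append(neigh)
--
--                 # opening valve takes one time-step
--                 yield from paths(neigh, duration + dur + 1)
--
--                 path.pop()
--                 visited.discard(neigh)
--
--                 is_leaf = False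
--
--         if is_leaf or not LEAVES_ONLY:
--             yield path
--
--     path = deque()
--     visited = {start}
--     yield from paths(start, 0)
--
-- def gains(adjacent: dict[str, list[str]], flows: dict[str, int], start: str, time: int) -> dict[tuple[str, ...], int]:
--     targets = list(adjacent)
--     targets.remove(start)
--
--     paths = {}
--     for path in iter_paths(adjacent, start, time):
--         time_left = time
--
--         curr = start
--         already_open = 0
--         gain = 0
--         for node in path:
--             # opening valve costs 1 time
--             duration = adjacent[curr][node] + 1
--
--             time_left -= duration
--
--             # add gain including opening time-step for opening said valve
--             gain += already_open * duration
--
--             # open valve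
--             already_open += flows[node]
--             curr = node
--
--         # persistent immutable key
--         paths[tuple(path)] = gain + already_open * time_left
--
--     return paths
-- ===== SOURCE B (Python) =====
-- def gains(adjacent: dict[str, list[str]], flows: dict[str, int], start: str, time: int) -> dict[tuple[str, ...], int]:
--     targets = list(adjacent)
--     targets.remove(start)
--
--     def dfs(curr, path, visited, gain, already_open, time_left):
--         out = []
--         is_leaf = True
--         for neigh, dur in adjacent[curr].items():
--             # moving there and opening the valve costs dur + 1
--             if dur + 1 <= time_left and neigh not in visited:
--                 is_leaf = False
--                 out += dfs(neigh, path + (neigh,), visited | {neigh},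
--                            gain + already_open * (dur + 1),
--                            already_open + flows[neigh],
--                            time_left - (dur + 1))
--         if is_leaf:
--             out.append((path, gain + already_open * time_left))
--         return out
--
--     return dict(dfs(start, (), {start}, 0, 0, time))
-- ===== Notes on version B (the rewrite author's own statement) =====
-- stated objective: alternative
-- what changed: A enumerates all leaf paths with a generator and then rescores each path from scratch with a second loop; B is a single recursive DFS that carries gain, already_open and time_left incrementally and emits (path, score) pairs directly at the leaves.
import Mathlib
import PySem

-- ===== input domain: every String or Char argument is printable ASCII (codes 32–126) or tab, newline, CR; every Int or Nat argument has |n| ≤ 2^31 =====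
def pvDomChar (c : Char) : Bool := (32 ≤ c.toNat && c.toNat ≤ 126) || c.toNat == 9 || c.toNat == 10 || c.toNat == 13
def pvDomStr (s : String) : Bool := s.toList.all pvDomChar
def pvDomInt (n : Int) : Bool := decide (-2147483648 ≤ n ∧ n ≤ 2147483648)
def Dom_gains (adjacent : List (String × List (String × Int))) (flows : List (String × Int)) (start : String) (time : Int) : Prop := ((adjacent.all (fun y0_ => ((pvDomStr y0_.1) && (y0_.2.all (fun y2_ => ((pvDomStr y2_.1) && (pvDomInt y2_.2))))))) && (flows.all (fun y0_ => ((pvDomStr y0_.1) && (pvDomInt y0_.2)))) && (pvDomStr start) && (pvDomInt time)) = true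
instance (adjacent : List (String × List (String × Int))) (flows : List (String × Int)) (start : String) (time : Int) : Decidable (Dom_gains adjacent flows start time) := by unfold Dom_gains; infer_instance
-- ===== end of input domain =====

-- B replaces A's enumerate-all-leaf-paths-then-rescore-each-path structure by a single DFS that
-- carries gain / already_open / time_left incrementally and emits (path, score) pairs at the leaves
-- (objective: alternative; same asymptotic cost).

-- ===== PORT A =====
-- adjacent[curr] ; a missing key is a KeyError in Python, excluded by Pre_gains (default never used inside Pre_)
def pvAdj (adjacent : List (String × List (String × Int))) (curr : String) : List (String × Int) :=
  (PySem.Dict.mk adjacent).getD curr []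

-- the generator `paths` inside iter_paths: leaf paths in yield order.
-- fuel is only a structural-recursion guard; under Pre_gains the visited set grows within the key set,
-- so fuel = adjacent.length + 1 is never exhausted on the inputs the claim covers.
def pvPathsA (adjacent : List (String × List (String × Int))) (time : Int) :
    Nat → PySem.Set String → List String → String → Int → List (List String)
  | 0, _, _, _, _ => []
  | fuel+1, visited, path, curr, duration =>
    let r := (pvAdj adjacent curr).foldl
      (fun (acc : List (List String) × Bool) nd =>
        if duration + nd.2 + 1 ≤ time ∧ nd.1 ∉ visited then
          (acc.1 ++ pvPathsA adjacent time fuel (PySem.Set.add visited nd.1) (path ++ [nd.1]) nd.1 (duration + nd.2 + 1), false)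
        else acc)
      ([], true)
    if r.2 then r.1 ++ [path] else r.1

-- body of A's per-path rescoring loop; state = (curr, time_left, already_open, gain)
def pvStepA (adjacent : List (String × List (String × Int))) (flows : List (String × Int))
    (st : String × Int × Int × Int) (node : String) : String × Int × Int × Int :=
  let duration := (PySem.Dict.mk (pvAdj adjacent st.1)).getD node 0 + 1
  (node, st.2.1 - duration, st.2.2.1 + (PySem.Dict.mk flows).getD node 0, st.2.2.2 + st.2.2.1 * duration)

def gains (adjacent : List (String × List (String × Int))) (flows : List (String × Int)) (start : String) (time : Int) : List (List String × Int) :=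
  -- targets = list(adjacent); targets.remove(start)  (ValueError when start is not a key: excluded by Pre_gains)
  match PySem.List.remove? ((PySem.Dict.mk adjacent).keys) start with
  | none => []
  | some _ =>
    ((pvPathsA adjacent time (adjacent.length + 1) (PySem.Set.ofList [start]) [] start 0).foldl
      (fun (d : PySem.Dict (List String) Int) path =>
        let r := path.foldl (pvStepA adjacent flows) (start, time, 0, 0)
        d.insert path (r.2.2.2 + r.2.2.1 * r.2.1))
      PySem.Dict.empty).items

-- ===== PORT B =====
-- the recursive dfs of Source B: returns the (path, score) pairs in DFS order
def pvDfsB (adjacent : List (String × List (String × Int))) (flows : List (String × Int)) :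
    Nat → PySem.Set String → List String → String → Int → Int → Int → List (List String × Int)
  | 0, _, _, _, _, _, _ => []
  | fuel+1, visited, path, curr, gain, alreadyOpen, timeLeft =>
    let r := (pvAdj adjacent curr).foldl
      (fun (acc : List (List String × Int) × Bool) nd =>
        if nd.2 + 1 ≤ timeLeft ∧ nd.1 ∉ visited then
          (acc.1 ++ pvDfsB adjacent flows fuel (PySem.Set.union visited (PySem.Set.ofList [nd.1])) (path ++ [nd.1]) nd.1
              (gain + alreadyOpen * (nd.2 + 1)) (alreadyOpen + (PySem.Dict.mk flows).getD nd.1 0) (timeLeft - (nd.2 + 1)), false)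
        else acc)
      ([], true)
    if r.2 then r.1 ++ [(path, gain + alreadyOpen * timeLeft)] else r.1

def gains_alt (adjacent : List (String × List (String × Int))) (flows : List (String × Int)) (start : String) (time : Int) : List (List String × Int) :=
  match PySem.List.remove? ((PySem.Dict.mk adjacent).keys) start with
  | none => []
  | some _ =>
    (PySem.Dict.ofList (pvDfsB adjacent flows (adjacent.length + 1) (PySem.Set.ofList [start]) [] start 0 0 time)).items

-- ===== PRECONDITION & SPEC =====
-- Pre_gains excludes the inputs on which the Python A raises: start not a key of adjacent (ValueError from
-- targets.remove), and a neighbour name missing from adjacent or flows, which raises KeyError when the DFS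
-- visits it — the latter is over-approximated by requiring either that every listed neighbour is present, or
-- that no first move from start is admissible at all (so the DFS never leaves start); some inputs on which a
-- missing neighbour exists but is never reached are thereby excluded even though A returns on them. It also
-- excludes association lists whose inner adjacency lists carry duplicate keys, which no Python dict argument
-- can present.
def Pre_gains (adjacent : List (String × List (String × Int))) (flows : List (String × Int)) (start : String) (time : Int) : Prop :=
  start ∈ adjacent.map Prod.fst ∧
  (∀ p ∈ adjacent, (p.2.map Prod.fst).Nodup) ∧
  ((∀ p ∈ adjacent, ∀ q ∈ p.2, q.1 ∈ adjacent.map Prod.fst ∧ q.1 ∈ flows.map Prod.fst) ∨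
   (∀ p ∈ adjacent, p.1 = start → ∀ q ∈ p.2, time < q.2 + 1 ∨ q.1 = start))
instance (adjacent : List (String × List (String × Int))) (flows : List (String × Int)) (start : String) (time : Int) : Decidable (Pre_gains adjacent flows start time) := by unfold Pre_gains; infer_instance

def pvWitness_gains : (List (String × List (String × Int))) × (List (String × Int)) × String × Int :=
  ([("A", [("B", 1)]), ("B", [])], [("A", 2), ("B", 3)], "A", 10)

def Spec_gains (adjacent : List (String × List (String × Int))) (flows : List (String × Int)) (start : String) (time : Int) (out : List (List String × Int)) : Prop := out = gains_alt adjacent flows start time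
instance (adjacent : List (String × List (String × Int))) (flows : List (String × Int)) (start : String) (time : Int) (out : List (List String × Int)) : Decidable (Spec_gains adjacent flows start time out) := by unfold Spec_gains; infer_instance

-- ===== CLAIM (what is proved, stated in full; the proofs are below) =====
def Claim_equal_gains : Prop := ∀ (adjacent : List (String × List (String × Int))) (flows : List (String × Int)) (start : String) (time : Int), Dom_gains adjacent flows start time → Pre_gains adjacent flows start time → Spec_gains adjacent flows start time (gains adjacent flows start time)

-- ===== LEMMAS AND PROOFS =====

-- visited | {x} in Source B is visited.add(x) of A's recursion
lemma union_singleton_eq_add (s : PySem.Set String) (x : String) :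
    PySem.Set.union s (PySem.Set.ofList [x]) = PySem.Set.add s x := rfl

-- first components of the inner adjacency list looked up by pvAdj are Nodup (under Pre_'s inner-Nodup hypothesis)
lemma nodup_pvAdj (adjacent : List (String × List (String × Int)))
    (hadj : ∀ p ∈ adjacent, (p.2.map Prod.fst).Nodup) (curr : String) :
    ((pvAdj adjacent curr).map Prod.fst).Nodup := by
  unfold pvAdj PySem.Dict.getD
  cases hfind : (PySem.Dict.mk adjacent).get? curr with
  | none => simp
  | some v =>
    have := PySem.Dict.mem_items_of_get?_eq_some (d := PySem.Dict.mk adjacent) hfind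
    simpa using hadj _ this

-- a pair of the inner list is what A's rescoring lookup finds (keys Nodup)
lemma pvAdj_lookup (adjacent : List (String × List (String × Int)))
    (hadj : ∀ p ∈ adjacent, (p.2.map Prod.fst).Nodup) (curr : String)
    {n : String} {d : Int} (hmem : (n, d) ∈ pvAdj adjacent curr) :
    (PySem.Dict.mk (pvAdj adjacent curr)).getD n 0 = d := by
  exact PySem.Dict.getD_of_mem_items (d := PySem.Dict.mk (pvAdj adjacent curr)) hmem
    (by simpa [PySem.Dict.keys] using nodup_pvAdj adjacent hadj curr) 0

-- the generic fold shape shared by the two DFS loops: if branch conditions agree pointwise and the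
-- recursive images agree up to `List.map F`, the accumulated (list, is_leaf) pairs agree up to map F.
lemma foldl_branch_map {γ : Type} (F : List String → List String × Int)
    (l : List γ)
    (cA cB : γ → Prop) [DecidablePred cA] [DecidablePred cB]
    (rA : γ → List (List String)) (rB : γ → List (List String × Int))
    (h : ∀ nd ∈ l, (cB nd ↔ cA nd) ∧ (cA nd → rB nd = (rA nd).map F)) :
    ∀ (accA : List (List String) × Bool) (accB : List (List String × Int) × Bool),
      accB.1 = accA.1.map F → accB.2 = accA.2 →
      (l.foldl (fun acc nd => if cB nd then (acc.1 ++ rB nd, false) else acc) accB).1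
        = (l.foldl (fun acc nd => if cA nd then (acc.1 ++ rA nd, false) else acc) accA).1.map F
      ∧ (l.foldl (fun acc nd => if cB nd then (acc.1 ++ rB nd, false) else acc) accB).2
        = (l.foldl (fun acc nd => if cA nd then (acc.1 ++ rA nd, false) else acc) accA).2 := by
  induction l with
  | nil => intro accA accB h1 h2; exact ⟨h1, h2⟩
  | cons nd t ih =>
    intro accA accB h1 h2
    have hnd := h nd (by simp)
    have ht : ∀ x ∈ t, (cB x ↔ cA x) ∧ (cA x → rB x = (rA x).map F) := fun x hx => h x (by simp [hx])
    by_cases hc : cA nd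
    · have hcB : cB nd := hnd.1.mpr hc
      simp only [List.foldl_cons, if_pos hc, if_pos hcB]
      exact ih ht _ _ (by simp [h1, hnd.2 hc]) rfl
    · have hcB : ¬ cB nd := fun hx => hc (hnd.1.mp hx)
      simp only [List.foldl_cons, if_neg hc, if_neg hcB]
      exact ih ht _ _ h1 h2

-- the main invariant: B's DFS equals A's path enumeration rescored by A's loop, when the carried
-- accumulators (gain, already_open, time_left) are exactly what A's rescoring fold produces on `path`.
lemma dfs_eq (adjacent : List (String × List (String × Int))) (flows : List (String × Int))
    (start : String) (time : Int)
    (hadj : ∀ p ∈ adjacent, (p.2.map Prod.fst).Nodup) :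
    ∀ (fuel : Nat) (visited : PySem.Set String) (path : List String) (curr : String)
      (tleft opn g : Int),
      path.foldl (pvStepA adjacent flows) (start, time, 0, 0) = (curr, tleft, opn, g) →
      pvDfsB adjacent flows fuel visited path curr g opn tleft
        = (pvPathsA adjacent time fuel visited path curr (time - tleft)).map
            (fun p =>
              let r := p.foldl (pvStepA adjacent flows) (start, time, 0, 0)
              (p, r.2.2.2 + r.2.2.1 * r.2.1)) := by
  intro fuel
  induction fuel with
  | zero => intro visited path curr tleft opn g _; simp [pvDfsB, pvPathsA]
  | succ fuel ih =>
    intro visited path curr tleft opn g hst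
    rw [pvDfsB, pvPathsA]
    have hfold := foldl_branch_map
      (fun p => (let r := p.foldl (pvStepA adjacent flows) (start, time, 0, 0)
                 (p, r.2.2.2 + r.2.2.1 * r.2.1)))
      (pvAdj adjacent curr)
      (fun nd => time - tleft + nd.2 + 1 ≤ time ∧ nd.1 ∉ visited)
      (fun nd => nd.2 + 1 ≤ tleft ∧ nd.1 ∉ visited)
      (fun nd => pvPathsA adjacent time fuel (PySem.Set.add visited nd.1) (path ++ [nd.1]) nd.1 (time - tleft + nd.2 + 1))
      (fun nd => pvDfsB adjacent flows fuel (PySem.Set.union visited (PySem.Set.ofList [nd.1])) (path ++ [nd.1]) nd.1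
          (g + opn * (nd.2 + 1)) (opn + (PySem.Dict.mk flows).getD nd.1 0) (tleft - (nd.2 + 1)))
      (by
        rintro ⟨n, dv⟩ hmem
        constructor
        · constructor <;> (intro hx; exact ⟨by omega, hx.2⟩)
        · intro _
          have hstep : (path ++ [n]).foldl (pvStepA adjacent flows) (start, time, 0, 0)
              = (n, tleft - (dv + 1), opn + (PySem.Dict.mk flows).getD n 0, g + opn * (dv + 1)) := by
            rw [List.foldl_append, hst]
            simp [pvStepA, pvAdj_lookup adjacent hadj curr hmem]
          have := ih (PySem.Set.add visited n) (path ++ [n]) n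
            (tleft - (dv + 1)) (opn + (PySem.Dict.mk flows).getD n 0) (g + opn * (dv + 1)) hstep
          have harg : time - tleft + (n, dv).2 + 1 = time - (tleft - ((n, dv).2 + 1)) := by ring
          dsimp only
          rw [union_singleton_eq_add, harg]
          exact this)
      ([], true) ([], true) rfl rfl
    beta_reduce at hfold
    rcases hfold with ⟨h1, h2⟩
    dsimp only
    rw [h1, h2]
    by_cases hleaf :
      ((pvAdj adjacent curr).foldl (fun acc nd =>
          if time - tleft + nd.2 + 1 ≤ time ∧ nd.1 ∉ visited then
            (acc.1 ++ pvPathsA adjacent time fuel (PySem.Set.add visited nd.1) (path ++ [nd.1]) nd.1 (time - tleft + nd.2 + 1), false)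
          else acc)
        (([] : List (List String)), true)).2 = true
    · simp only [hleaf, if_pos, List.map_append, List.map_cons, List.map_nil, hst]
    · simp only [Bool.not_eq_true] at hleaf
      simp only [hleaf, Bool.false_eq_true, if_false]

-- ===== VERDICT (by name: the statement is the Claim_ definition above) =====
theorem gains_spec : Claim_equal_gains := by
  intro adjacent flows start time _ hpre
  unfold Spec_gains gains gains_alt
  have hkeys : start ∈ (PySem.Dict.mk adjacent).keys := by
    simpa [PySem.Dict.keys] using hpre.1
  cases hrem : PySem.List.remove? ((PySem.Dict.mk adjacent).keys) start with
  | none =>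
    exfalso
    exact (PySem.List.remove?_eq_none_iff _ _).mp hrem hkeys
  | some _ =>
    have hmain := dfs_eq adjacent flows start time (hpre.2.1)
      (adjacent.length + 1) (PySem.Set.ofList [start]) [] start time 0 0 (by simp)
    have : time - time = 0 := by ring
    rw [this] at hmain
    rw [hmain]
    unfold PySem.Dict.ofList PySem.Dict.update
    rw [List.foldl_map]
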